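-- pv_equiv track=rewrite | github.com/hamian84/WeatherAIBrief | scripts/direct_grounded_briefing_runner.py | _derive_evidence_ids
-- ===== SOURCE A (Python) =====
-- from typing import Any
--
-- def _derive_evidence_ids(
--     evidence_refs: list[str],
--     focus_regions: list[str],
--     evidence_by_id: dict[str, dict[str, Any]],
--     context: str,
-- ) -> list[str]:
--     ref_set = {item for item in evidence_refs if item}
--     region_set = {item for item in focus_regions if item}
--     if not ref_set:
--         raise ValueError(f"{context}: evidence_refs must not be empty for evidence_id derivation")
--     if not region_set:
--         raise ValueError(f"{context}: focus_regions must not be empty for evidence_id derivation")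
--
--     matched: list[str] = []
--     for evidence_id, evidence in evidence_by_id.items():
--         refs = {str(ref).strip() for ref in evidence.get("active_image_refs", []) or [] if str(ref).strip()}
--         regions = {str(region).strip() for region in evidence.get("region_labels", []) or [] if str(region).strip()}
--         if refs & ref_set and regions & region_set:
--             matched.append(evidence_id)
--     if matched:
--         return sorted(matched)
--
--     for evidence_id, evidence in evidence_by_id.items():
--         refs = {str(ref).strip() for ref in evidence.get("active_image_refs", []) or [] if str(ref).strip()}
--         if refs & ref_set:
--             matched.append(evidence_id)
--     if matched:
--         return sorted(dict.fromkeys(matched))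
--
--     raise ValueError(f"{context}: unable to derive evidence_ids from selected evidence_refs/focus_regions")
-- ===== SOURCE B (Python) =====
-- def _derive_evidence_ids(
--     evidence_refs,
--     focus_regions,
--     evidence_by_id,
--     context,
-- ):
--     ref_set = {item for item in evidence_refs if item}
--     region_set = {item for item in focus_regions if item}
--     if not ref_set:
--         raise ValueError(f"{context}: evidence_refs must not be empty for evidence_id derivation")
--     if not region_set:
--         raise ValueError(f"{context}: focus_regions must not be empty for evidence_id derivation")
--
--     full_matches = []
--     ref_matches = []
--     for evidence_id, evidence in evidence_by_id.items():
--         refs = {str(ref).strip() for ref in evidence.get("active_image_refs", []) or [] if str(ref).strip()}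
--         if not (refs & ref_set):
--             continue
--         ref_matches.append(evidence_id)
--         regions = {str(region).strip() for region in evidence.get("region_labels", []) or [] if str(region).strip()}
--         if regions & region_set:
--             full_matches.append(evidence_id)
--     if full_matches:
--         return sorted(full_matches)
--     if ref_matches:
--         return sorted(dict.fromkeys(ref_matches))
--     raise ValueError(f"{context}: unable to derive evidence_ids from selected evidence_refs/focus_regions")
-- ===== Notes on version B (the rewrite author's own statement) =====
-- stated objective: alternative
-- what changed: Replaces A's two full passes over evidence_by_id (full matches first, then a separate ref-only pass) with a single pass that accumulates both match lists at once, skipping the region computation entirely when refs do not intersect, and picks the answer after the loop.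
import Mathlib
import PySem

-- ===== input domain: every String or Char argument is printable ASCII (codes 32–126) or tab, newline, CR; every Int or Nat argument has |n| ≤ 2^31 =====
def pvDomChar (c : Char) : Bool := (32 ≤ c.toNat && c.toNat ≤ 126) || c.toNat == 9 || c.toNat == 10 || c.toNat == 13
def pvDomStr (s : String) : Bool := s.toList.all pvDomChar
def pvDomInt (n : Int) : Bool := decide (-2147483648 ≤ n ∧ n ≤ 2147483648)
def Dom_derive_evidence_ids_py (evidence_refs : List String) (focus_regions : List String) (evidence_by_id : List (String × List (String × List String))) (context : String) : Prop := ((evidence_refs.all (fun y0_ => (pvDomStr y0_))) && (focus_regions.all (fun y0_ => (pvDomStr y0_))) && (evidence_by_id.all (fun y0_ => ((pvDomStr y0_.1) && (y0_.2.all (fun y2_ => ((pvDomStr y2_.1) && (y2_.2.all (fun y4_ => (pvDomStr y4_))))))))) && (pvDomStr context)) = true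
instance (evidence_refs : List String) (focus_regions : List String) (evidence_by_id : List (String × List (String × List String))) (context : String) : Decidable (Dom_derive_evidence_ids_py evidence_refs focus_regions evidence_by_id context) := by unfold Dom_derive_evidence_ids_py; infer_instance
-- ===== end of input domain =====

-- B does A's work in ONE pass over evidence_by_id (accumulating full matches and ref-only
-- matches together, skipping the region computation when refs do not intersect) instead of
-- A's two separate passes; equivalence is about the RETURN value (A raises where Pre_ fails).

-- ===== PORT A =====
-- evidence.get(k, []) or [] : first-match association-list lookup with [] default
def pvGetList (ev : List (String × List String)) (k : String) : List String :=
  match ev.find? (fun p => p.1 == k) with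
  | some p => p.2
  | none => []

-- {str(x).strip() for x in xs if str(x).strip()} (str() is the identity on str inputs)
def pvClean (xs : List String) : PySem.Set String :=
  PySem.Set.ofList ((xs.map PySem.Str.strip).filter (fun s => s ≠ ""))

def derive_evidence_ids_py (evidence_refs : List String) (focus_regions : List String) (evidence_by_id : List (String × List (String × List String))) (context : String) : List String :=
  let ref_set : PySem.Set String := PySem.Set.ofList (evidence_refs.filter (fun s => s ≠ ""))
  let region_set : PySem.Set String := PySem.Set.ofList (focus_regions.filter (fun s => s ≠ ""))
  if ref_set = [] then []            -- Python raises ValueError here (excluded by Pre_)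
  else if region_set = [] then []    -- Python raises ValueError here (excluded by Pre_)
  else
    let matched := evidence_by_id.foldl (fun acc p =>
      let refs := pvClean (pvGetList p.2 "active_image_refs")
      let regions := pvClean (pvGetList p.2 "region_labels")
      if PySem.Set.inter refs ref_set ≠ [] ∧ PySem.Set.inter regions region_set ≠ [] then
        acc ++ [p.1] else acc) []
    if matched ≠ [] then PySem.List.sorted matched (fun x => x) false
    else
      let matched2 := evidence_by_id.foldl (fun acc p =>
        let refs := pvClean (pvGetList p.2 "active_image_refs")
        if PySem.Set.inter refs ref_set ≠ [] then acc ++ [p.1] else acc) []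
      if matched2 ≠ [] then PySem.List.sorted (PySem.List.dedup matched2) (fun x => x) false
      else []                        -- Python raises ValueError here (excluded by Pre_)

-- ===== PORT B =====
def derive_evidence_ids_py_alt (evidence_refs : List String) (focus_regions : List String) (evidence_by_id : List (String × List (String × List String))) (context : String) : List String :=
  let ref_set : PySem.Set String := PySem.Set.ofList (evidence_refs.filter (fun s => s ≠ ""))
  let region_set : PySem.Set String := PySem.Set.ofList (focus_regions.filter (fun s => s ≠ ""))
  if ref_set = [] then []            -- ValueError (excluded by Pre_)
  else if region_set = [] then []    -- ValueError (excluded by Pre_)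
  else
    let fm_rm := evidence_by_id.foldl (fun (acc : List String × List String) p =>
      let refs := pvClean (pvGetList p.2 "active_image_refs")
      if PySem.Set.inter refs ref_set = [] then acc
      else
        let rm := acc.2 ++ [p.1]
        let regions := pvClean (pvGetList p.2 "region_labels")
        if PySem.Set.inter regions region_set ≠ [] then (acc.1 ++ [p.1], rm)
        else (acc.1, rm)) ([], [])
    if fm_rm.1 ≠ [] then PySem.List.sorted fm_rm.1 (fun x => x) false
    else if fm_rm.2 ≠ [] then PySem.List.sorted (PySem.List.dedup fm_rm.2) (fun x => x) false
    else []                          -- ValueError (excluded by Pre_)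

-- ===== PRECONDITION & SPEC =====
-- Pre_ holds exactly where the Python A returns: it raises ValueError when evidence_refs has no
-- truthy element, when focus_regions has no truthy element, or when no evidence entry's cleaned
-- active_image_refs intersects the ref set.
def Pre_derive_evidence_ids_py (evidence_refs : List String) (focus_regions : List String) (evidence_by_id : List (String × List (String × List String))) (context : String) : Prop :=
  evidence_refs.filter (fun s => s ≠ "") ≠ [] ∧
  focus_regions.filter (fun s => s ≠ "") ≠ [] ∧
  (evidence_by_id.any (fun p =>
    PySem.Set.inter (pvClean (pvGetList p.2 "active_image_refs"))
      (PySem.Set.ofList (evidence_refs.filter (fun s => s ≠ ""))) ≠ [])) = true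
instance (evidence_refs : List String) (focus_regions : List String) (evidence_by_id : List (String × List (String × List String))) (context : String) : Decidable (Pre_derive_evidence_ids_py evidence_refs focus_regions evidence_by_id context) := by unfold Pre_derive_evidence_ids_py; infer_instance

def pvWitness_derive_evidence_ids_py : List String × List String × (List (String × List (String × List String))) × String :=
  (["r1"], ["g1"], [("e1", [("active_image_refs", ["r1"]), ("region_labels", ["g1"])])], "ctx")

def Spec_derive_evidence_ids_py (evidence_refs : List String) (focus_regions : List String) (evidence_by_id : List (String × List (String × List String))) (context : String) (out : List String) : Prop := out = derive_evidence_ids_py_alt evidence_refs focus_regions evidence_by_id context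
instance (evidence_refs : List String) (focus_regions : List String) (evidence_by_id : List (String × List (String × List String))) (context : String) (out : List String) : Decidable (Spec_derive_evidence_ids_py evidence_refs focus_regions evidence_by_id context out) := by unfold Spec_derive_evidence_ids_py; infer_instance

-- ===== CLAIM (what is proved, stated in full; the proofs are below) =====
def Claim_equal_derive_evidence_ids_py : Prop := ∀ (evidence_refs : List String) (focus_regions : List String) (evidence_by_id : List (String × List (String × List String))) (context : String), Dom_derive_evidence_ids_py evidence_refs focus_regions evidence_by_id context → Pre_derive_evidence_ids_py evidence_refs focus_regions evidence_by_id context → Spec_derive_evidence_ids_py evidence_refs focus_regions evidence_by_id context (derive_evidence_ids_py evidence_refs focus_regions evidence_by_id context)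

-- ===== LEMMAS AND PROOFS =====

-- B's single fold computes the pair of A's two fold results.
theorem pv_fold_pair (rs gs : PySem.Set String)
    (l : List (String × List (String × List String))) (acc1 acc2 : List String) :
    l.foldl (fun (acc : List String × List String) p =>
      let refs := pvClean (pvGetList p.2 "active_image_refs")
      if PySem.Set.inter refs rs = [] then acc
      else
        let rm := acc.2 ++ [p.1]
        let regions := pvClean (pvGetList p.2 "region_labels")
        if PySem.Set.inter regions gs ≠ [] then (acc.1 ++ [p.1], rm)
        else (acc.1, rm)) (acc1, acc2)
    = (l.foldl (fun acc p =>
        let refs := pvClean (pvGetList p.2 "active_image_refs")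
        let regions := pvClean (pvGetList p.2 "region_labels")
        if PySem.Set.inter refs rs ≠ [] ∧ PySem.Set.inter regions gs ≠ [] then
          acc ++ [p.1] else acc) acc1,
       l.foldl (fun acc p =>
        let refs := pvClean (pvGetList p.2 "active_image_refs")
        if PySem.Set.inter refs rs ≠ [] then acc ++ [p.1] else acc) acc2) := by
  induction l generalizing acc1 acc2 with
  | nil => rfl
  | cons p t ih =>
    simp only [List.foldl_cons]
    by_cases h1 : PySem.Set.inter (pvClean (pvGetList p.2 "active_image_refs")) rs = []
    · simpa [h1] using ih acc1 acc2
    · by_cases h2 : PySem.Set.inter (pvClean (pvGetList p.2 "region_labels")) gs = []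
      · simpa [h1, h2] using ih acc1 (acc2 ++ [p.1])
      · simpa [h1, h2] using ih (acc1 ++ [p.1]) (acc2 ++ [p.1])

-- ===== VERDICT (by name: the statement is the Claim_ definition above) =====
theorem derive_evidence_ids_py_spec : Claim_equal_derive_evidence_ids_py := by
  intro er fr eb ctx _ _
  unfold Spec_derive_evidence_ids_py derive_evidence_ids_py derive_evidence_ids_py_alt
  simp only [pv_fold_pair]
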